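-- pv_equiv track=rewrite | github.com/huzhengyu2016/FGeo-NSS | src/nss/tools.py | _get_geometric_premise
-- ===== SOURCE A (Python) =====
-- def _get_geometric_premise(geometric_premises, added_paras):
--     geometric_premise = []  # (predicate, paras)
--     for i in range(len(geometric_premises))[::-1]:
--         geometric_premises_predicate, geometric_premises_paras = geometric_premises[i]
--         if len(set(geometric_premises_paras) - set(added_paras)) == 0:
--             geometric_premise.append(geometric_premises[i])
--             geometric_premises.pop(i)
--     # sort according to the number of paras
--     geometric_premise = tuple(sorted(geometric_premise, key=lambda x: (len(x[1]), len(set(x[1]))), reverse=True))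
--     return geometric_premise
-- ===== SOURCE B (Python) =====
-- def _get_geometric_premise(geometric_premises, added_paras):
--     # Non-destructive single forward pass: partition into kept/matched, then
--     # mutate via slice assignment.  Equivalence claimed for the RETURN value;
--     # B performs the same observable mutation (removing matched items).
--     added = set(added_paras)
--     kept = []
--     matched = []
--     for item in geometric_premises:
--         if set(item[1]) <= added:
--             matched.append(item)
--         else:
--             kept.append(item)
--     geometric_premises[:] = kept
--     matched.reverse()  # original collects in reverse index order; sort is stable
--     return tuple(sorted(matched, key=lambda x: (len(x[1]), len(set(x[1]))), reverse=True))
-- ===== Notes on version B (the rewrite author's own statement) =====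
-- stated objective: faster
-- what changed: Replaces the destructive reverse-index iteration with pop() (each pop shifts the tail) by a single non-destructive forward partition into kept/matched lists, a slice assignment for the mutation, and a reverse before the stable sort to keep identical tie-breaking.
import Mathlib
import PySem

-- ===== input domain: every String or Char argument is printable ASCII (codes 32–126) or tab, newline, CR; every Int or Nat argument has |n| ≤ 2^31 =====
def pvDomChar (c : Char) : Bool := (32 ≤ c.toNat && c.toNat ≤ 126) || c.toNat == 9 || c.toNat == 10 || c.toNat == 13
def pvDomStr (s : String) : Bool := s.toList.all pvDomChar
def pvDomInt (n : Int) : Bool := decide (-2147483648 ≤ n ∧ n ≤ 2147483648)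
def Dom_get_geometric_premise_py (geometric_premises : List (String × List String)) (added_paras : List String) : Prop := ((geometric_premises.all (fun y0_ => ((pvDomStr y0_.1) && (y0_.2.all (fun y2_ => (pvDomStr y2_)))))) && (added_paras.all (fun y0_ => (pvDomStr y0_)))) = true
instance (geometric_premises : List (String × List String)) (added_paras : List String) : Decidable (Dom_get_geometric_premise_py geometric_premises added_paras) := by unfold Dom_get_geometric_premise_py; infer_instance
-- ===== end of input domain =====

-- B replaces A's destructive reverse-index pop loop by a forward partition + reverse
-- before the stable sort (simpler decomposition).  A mutates its first argument in
-- place; the equivalence proved here is about the RETURN value only (Source B performs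
-- the same observable mutation).

-- ===== PORT A =====
-- for i in range(len(gps))[::-1]: pop/append; indices are always in range, so the
-- pyGetD/pop? defaults are never taken.
def get_geometric_premise_py (geometric_premises : List (String × List String)) (added_paras : List String) : List (String × List String) :=
  let idxs := (PySem.List.slice? (PySem.List.pyRange 0 (geometric_premises.length : Int) 1) none none (-1)).getD []
  let st := idxs.foldl (fun (st : List (String × List String) × List (String × List String)) i =>
      let pair := PySem.List.pyGetD st.1 i ("", [])
      if (PySem.Set.diff (PySem.Set.ofList pair.2) (PySem.Set.ofList added_paras)).length = 0 then
        (((PySem.List.pop? st.1 i).map Prod.snd).getD st.1, st.2 ++ [pair])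
      else st) (geometric_premises, [])
  PySem.List.sorted2 st.2 (fun x => (x.2.length : Int)) (fun x => ((PySem.Set.ofList x.2).length : Int)) true

-- ===== PORT B =====
def get_geometric_premise_py_alt (geometric_premises : List (String × List String)) (added_paras : List String) : List (String × List String) :=
  let added := PySem.Set.ofList added_paras
  let st := geometric_premises.foldl (fun (st : List (String × List String) × List (String × List String)) item =>
      if PySem.Set.issubset (PySem.Set.ofList item.2) added then (st.1, st.2 ++ [item])
      else (st.1 ++ [item], st.2)) ([], [])
  let matched := st.2.reverse
  PySem.List.sorted2 matched (fun x => (x.2.length : Int)) (fun x => ((PySem.Set.ofList x.2).length : Int)) true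

-- ===== PRECONDITION & SPEC =====
def Spec_get_geometric_premise_py (geometric_premises : List (String × List String)) (added_paras : List String) (out : List (String × List String)) : Prop := out = get_geometric_premise_py_alt geometric_premises added_paras
instance (geometric_premises : List (String × List String)) (added_paras : List String) (out : List (String × List String)) : Decidable (Spec_get_geometric_premise_py geometric_premises added_paras out) := by unfold Spec_get_geometric_premise_py; infer_instance

-- ===== CLAIM (what is proved, stated in full; the proofs are below) =====
def Claim_equal_get_geometric_premise_py : Prop := ∀ (geometric_premises : List (String × List String)) (added_paras : List String), Dom_get_geometric_premise_py geometric_premises added_paras → Spec_get_geometric_premise_py geometric_premises added_paras (get_geometric_premise_py geometric_premises added_paras)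

-- ===== LEMMAS AND PROOFS =====

-- A's emptiness test on the set difference equals B's subset test.
theorem pv_cond_eq (paras added : List String) :
    ((PySem.Set.diff (PySem.Set.ofList paras) (PySem.Set.ofList added)).length = 0)
      ↔ PySem.Set.issubset (PySem.Set.ofList paras) (PySem.Set.ofList added) = true := by
  rw [List.length_eq_zero_iff, List.eq_nil_iff_forall_not_mem, PySem.Set.issubset_iff]
  constructor
  · intro h x hx
    by_contra hna
    exact h x ((PySem.Set.mem_diff _ _ _).mpr ⟨hx, hna⟩)
  · intro h x hx
    rcases (PySem.Set.mem_diff _ _ _).mp hx with ⟨h1, h2⟩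
    exact h2 (h x h1)

-- the boolean condition both loops decide on (A's form)
def pvc (added_paras : List String) (p : String × List String) : Bool :=
  decide ((PySem.Set.diff (PySem.Set.ofList p.2) (PySem.Set.ofList added_paras)).length = 0)

theorem pv_loopA (added_paras : List String) (gs : List (String × List String)) :
    ∀ (suffix acc : List (String × List String)),
    ((PySem.List.pyRange 0 (gs.length : Int) 1).reverse).foldl
      (fun (st : List (String × List String) × List (String × List String)) i =>
        let pair := PySem.List.pyGetD st.1 i ("", [])
        if (PySem.Set.diff (PySem.Set.ofList pair.2) (PySem.Set.ofList added_paras)).length = 0 then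
          (((PySem.List.pop? st.1 i).map Prod.snd).getD st.1, st.2 ++ [pair])
        else st) (gs ++ suffix, acc)
      = ((gs.filter (fun p => !(pvc added_paras p))) ++ suffix,
         acc ++ (gs.filter (pvc added_paras)).reverse) := by
  induction gs using List.reverseRecOn with
  | nil => intro suffix acc; simp [PySem.List.pyRange]
  | append_singleton ys x ih =>
    intro suffix acc
    have hlen : ((ys ++ [x]).length : Int) = (ys.length : Int) + 1 := by simp
    rw [hlen, PySem.List.pyRange_one_succ_right (Int.natCast_nonneg _)]
    have hget : PySem.List.pyGetD ((ys ++ [x]) ++ suffix) ((ys.length : Nat) : Int) ("", [])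
        = x := by
      rw [PySem.List.pyGetD_natCast]
      simp [List.getD_eq_getElem?_getD]
    have herase : (ys ++ x :: suffix).eraseIdx ys.length = ys ++ suffix := by
      rw [List.eraseIdx_append_of_length_le (le_refl _), Nat.sub_self, List.eraseIdx_cons_zero]
    have hpop : PySem.List.pop? ((ys ++ [x]) ++ suffix) ((ys.length : Nat) : Int)
        = some (x, ys ++ suffix) := by
      rw [PySem.List.pop?_natCast _ _ (by simp)]
      simp [List.append_assoc, herase]
    by_cases hc : (PySem.Set.diff (PySem.Set.ofList x.2) (PySem.Set.ofList added_paras)).length = 0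
    · simp only [List.reverse_append, List.reverse_cons, List.reverse_nil, List.nil_append,
        List.singleton_append, List.foldl_cons, hget, hpop, Option.map_some, Option.getD_some, if_pos hc]
      rw [ih suffix (acc ++ [x])]
      have hcb : pvc added_paras x = true := by
        simp only [pvc, decide_eq_true_eq]; exact hc
      simp [List.filter_append, hcb]
    · simp only [List.reverse_append, List.reverse_cons, List.reverse_nil, List.nil_append,
        List.singleton_append, List.foldl_cons, hget, if_neg hc]
      rw [show (ys ++ [x]) ++ suffix = ys ++ ([x] ++ suffix) by simp, ih ([x] ++ suffix) acc]
      have hcb : pvc added_paras x = false := by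
        simp only [pvc, decide_eq_false_iff_not]; exact hc
      simp [List.filter_append, hcb]

theorem pv_loopB (added_paras : List String) (gs : List (String × List String)) :
    ∀ (k m : List (String × List String)),
    gs.foldl (fun (st : List (String × List String) × List (String × List String)) item =>
      if PySem.Set.issubset (PySem.Set.ofList item.2) (PySem.Set.ofList added_paras) then (st.1, st.2 ++ [item])
      else (st.1 ++ [item], st.2)) (k, m)
      = (k ++ gs.filter (fun p => !(pvc added_paras p)), m ++ gs.filter (pvc added_paras)) := by
  induction gs with
  | nil => intro k m; simp
  | cons x xs ih =>
    intro k m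
    simp only [List.foldl_cons]
    by_cases hc : PySem.Set.issubset (PySem.Set.ofList x.2) (PySem.Set.ofList added_paras) = true
    · have hcb : pvc added_paras x = true := by
        simp only [pvc, decide_eq_true_eq]
        exact (pv_cond_eq x.2 added_paras).mpr hc
      rw [if_pos hc, ih]
      simp [hcb]
    · have hcb : pvc added_paras x = false := by
        simp only [pvc, decide_eq_false_iff_not]
        intro h; exact hc ((pv_cond_eq x.2 added_paras).mp h)
      rw [if_neg hc, ih]
      simp [hcb]

-- ===== VERDICT (by name: the statement is the Claim_ definition above) =====
theorem get_geometric_premise_py_spec : Claim_equal_get_geometric_premise_py := by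
  intro gps added _
  unfold Spec_get_geometric_premise_py get_geometric_premise_py get_geometric_premise_py_alt
  rw [PySem.List.slice?_none_none_neg_one]
  simp only [Option.getD_some]
  have hA := pv_loopA added gps [] []
  simp only [List.append_nil, List.nil_append] at hA
  rw [hA, pv_loopB added gps [] []]
  simp
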